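-- pv_equiv track=rewrite | github.com/sydlexius/media-automation | TagExplicitLyrics.py | detect_stems
-- ===== SOURCE A (Python) =====
-- def detect_stems(
--     word_tokens: list[str],
--     stems: list[str],
--     false_positives: list[str],
-- ) -> list[str]:
--     """Substring match each stem against word tokens, filtered by false positives."""
--     matched: list[str] = []
--     fp_lower = [fp.lower() for fp in false_positives]
--     for stem in stems:
--         stem_l = stem.lower()
--         for word in word_tokens:
--             if stem_l in word:
--                 # Check if the matched word is (or contains) a false positive
--                 is_fp = any(fp in word for fp in fp_lower)
--                 if not is_fp:
--                     matched.append(word)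
--                     break  # one match per stem is enough
--     return matched
-- ===== SOURCE B (Python) =====
-- def detect_stems(
--     word_tokens: list[str],
--     stems: list[str],
--     false_positives: list[str],
-- ) -> list[str]:
--     """Substring match each stem against word tokens, filtered by false positives.
--
--     Single word-outer pass: each clean word fills the slot of every still-unmatched
--     stem it contains; slots are then read out in stem order.
--     """
--     fp_lower = [fp.lower() for fp in false_positives]
--     slots = [[s.lower(), None] for s in stems]
--     for w in word_tokens:
--         if any(fp in w for fp in fp_lower):
--             continue
--         for slot in slots:
--             if slot[1] is None and slot[0] in w:
--                 slot[1] = w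
--     return [slot[1] for slot in slots if slot[1] is not None]
-- ===== Notes on version B (the rewrite author's own statement) =====
-- stated objective: faster
-- what changed: B reverses the loop nesting: one word-outer pass checks each word's false-positive status once and fills a per-stem slot table with the first clean containing word, instead of A's stem-outer scan that re-tests false positives for every stem.
import Mathlib
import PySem

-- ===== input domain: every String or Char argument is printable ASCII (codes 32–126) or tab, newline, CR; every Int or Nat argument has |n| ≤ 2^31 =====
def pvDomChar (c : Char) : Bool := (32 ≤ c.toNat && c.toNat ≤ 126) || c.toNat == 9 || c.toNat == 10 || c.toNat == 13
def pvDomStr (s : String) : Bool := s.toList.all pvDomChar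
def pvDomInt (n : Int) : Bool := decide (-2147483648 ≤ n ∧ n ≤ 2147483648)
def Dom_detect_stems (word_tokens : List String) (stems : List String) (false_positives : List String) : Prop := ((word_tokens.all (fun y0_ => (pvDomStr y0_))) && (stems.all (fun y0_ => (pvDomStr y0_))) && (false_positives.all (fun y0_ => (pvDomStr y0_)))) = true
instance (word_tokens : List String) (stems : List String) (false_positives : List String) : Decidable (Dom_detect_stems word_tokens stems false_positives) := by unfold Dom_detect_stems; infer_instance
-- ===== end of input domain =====

-- B reverses the loop nesting: one word-outer pass tests each word's false-positive status once
-- and fills a per-stem slot table with the first clean containing word (objective: faster).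


-- ===== PORT A =====
-- A's inner 'for word in word_tokens: …' loop with its break, for one stem
def aFindWord (stem_l : String) (fp_lower : List String) : List String → Option String
  | [] => none
  | w :: ws =>
    if PySem.Str.isIn stem_l w then
      if fp_lower.any (fun fp => PySem.Str.isIn fp w) then aFindWord stem_l fp_lower ws
      else some w
    else aFindWord stem_l fp_lower ws

def detect_stems (word_tokens : List String) (stems : List String) (false_positives : List String) : List String :=
  let fp_lower := false_positives.map PySem.Str.lower
  stems.foldl (fun matched stem =>
    match aFindWord (PySem.Str.lower stem) fp_lower word_tokens with
    | some w => matched ++ [w]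
    | none => matched) []

-- ===== PORT B =====
-- B's inner 'for slot in slots: …' body: fill every still-empty slot whose stem the word contains
def bFill (w : String) (slots : List (String × Option String)) : List (String × Option String) :=
  slots.map (fun slot => if slot.2.isNone && PySem.Str.isIn slot.1 w then (slot.1, some w) else slot)

def detect_stems_alt (word_tokens : List String) (stems : List String) (false_positives : List String) : List String :=
  let fp_lower := false_positives.map PySem.Str.lower
  let slots := stems.map (fun s => (PySem.Str.lower s, (none : Option String)))
  let final := word_tokens.foldl (fun slots w =>
    if fp_lower.any (fun fp => PySem.Str.isIn fp w) then slots else bFill w slots) slots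
  final.filterMap (fun slot => slot.2)

-- ===== PRECONDITION & SPEC =====
def Spec_detect_stems (word_tokens : List String) (stems : List String) (false_positives : List String) (out : List String) : Prop := out = detect_stems_alt word_tokens stems false_positives
instance (word_tokens : List String) (stems : List String) (false_positives : List String) (out : List String) : Decidable (Spec_detect_stems word_tokens stems false_positives out) := by unfold Spec_detect_stems; infer_instance

-- ===== CLAIM (what is proved, stated in full; the proofs are below) =====
def Claim_equal_detect_stems : Prop := ∀ (word_tokens : List String) (stems : List String) (false_positives : List String), Dom_detect_stems word_tokens stems false_positives → Spec_detect_stems word_tokens stems false_positives (detect_stems word_tokens stems false_positives)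

-- ===== LEMMAS AND PROOFS =====
-- B's word step acting on one slot
def bStep (fp_lower : List String) (p : String × Option String) (w : String) : String × Option String :=
  if fp_lower.any (fun fp => PySem.Str.isIn fp w) then p
  else if p.2.isNone && PySem.Str.isIn p.1 w then (p.1, some w) else p

-- the word-outer fold over the slot list is a per-slot fold (the update is pointwise)
theorem foldl_bFill_eq_map (fp_lower : List String) (ws : List String)
    (slots : List (String × Option String)) :
    ws.foldl (fun sl w =>
        if fp_lower.any (fun fp => PySem.Str.isIn fp w) then sl else bFill w sl) slots =
      slots.map (fun p => ws.foldl (bStep fp_lower) p) := by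
  induction ws generalizing slots with
  | nil => simp [List.foldl]
  | cons w ws ih =>
    simp only [List.foldl_cons]
    cases hfp : fp_lower.any (fun fp => PySem.Str.isIn fp w) with
    | true =>
      simp only [ih]
      refine List.map_congr_left (fun p _ => ?_)
      rw [show bStep fp_lower p w = p from by simp only [bStep, hfp, if_true]]
    | false =>
      simp only [Bool.false_eq_true, if_false]
      rw [ih, bFill, List.map_map]
      refine List.map_congr_left (fun p _ => ?_)
      simp only [Function.comp]
      rw [show bStep fp_lower p w = (if p.2.isNone && PySem.Str.isIn p.1 w then (p.1, some w) else p) from by simp only [bStep, hfp, Bool.false_eq_true, if_false]]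

-- a filled slot never changes again
theorem foldl_bStep_some (fp_lower : List String) (ws : List String) (sl : String) (v : String) :
    ws.foldl (bStep fp_lower) (sl, some v) = (sl, some v) := by
  induction ws with
  | nil => rfl
  | cons w ws ih =>
    simp only [List.foldl_cons, bStep]
    split_ifs <;> simp_all

-- the per-slot fold computes exactly A's inner-loop result for that stem
theorem foldl_bStep_eq_aFindWord (fp_lower : List String) (ws : List String) (sl : String) :
    ws.foldl (bStep fp_lower) (sl, none) = (sl, aFindWord sl fp_lower ws) := by
  induction ws with
  | nil => rfl
  | cons w ws ih =>
    simp only [List.foldl_cons, bStep, aFindWord]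
    cases hfp : fp_lower.any (fun fp => PySem.Str.isIn fp w) <;>
      cases hs : PySem.Str.isIn sl w <;>
        simp [ih, foldl_bStep_some]

-- A's accumulating fold over stems is a filterMap of its inner loop
theorem foldl_append_eq_filterMap (fp_lower : List String) (wt : List String)
    (stems : List String) (acc : List String) :
    stems.foldl (fun matched stem =>
      match aFindWord (PySem.Str.lower stem) fp_lower wt with
      | some w => matched ++ [w]
      | none => matched) acc =
    acc ++ stems.filterMap (fun stem => aFindWord (PySem.Str.lower stem) fp_lower wt) := by
  induction stems generalizing acc with
  | nil => simp
  | cons s ss ih =>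
    simp only [List.foldl_cons, List.filterMap_cons]
    cases h : aFindWord (PySem.Str.lower s) fp_lower wt <;> simp [ih]

-- ===== VERDICT (by name: the statement is the Claim_ definition above) =====
theorem detect_stems_spec : Claim_equal_detect_stems := by
  intro word_tokens stems false_positives _
  unfold Spec_detect_stems detect_stems detect_stems_alt
  simp only [foldl_bFill_eq_map, foldl_append_eq_filterMap, List.map_map, List.filterMap_map,
    Function.comp, foldl_bStep_eq_aFindWord, List.nil_append]
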